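-- pv_equiv track=rewrite | github.com/Polkadot-Stingray/grass | 프로그래머스/1/135808. 과일 장수/과일 장수.py | solution
-- ===== SOURCE A (Python) =====
-- def solution(k, m, score):
--     answer = 0
--     many=len(score)
--     score.sort()
--
--     for _ in range(many//m):
--         box=[]
--         for _ in range(m):
--             box.append(score.pop())
--         sc=min(box)
--         answer+=sc*m
--
--
--     return answer
-- ===== SOURCE B (Python) =====
-- def solution(k, m, score):
--     # Note: unlike A, this implementation does not mutate `score`
--     # (A sorts it in place and pops all consumed elements).
--     s = sorted(score)
--     n = len(s)
--     q = n // m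
--     r = n - m * q
--     return m * sum(s[r + i * m] for i in range(q))
-- ===== Notes on version B (the rewrite author's own statement) =====
-- stated objective: simpler
-- what changed: Instead of popping m elements per box and taking min() of each box, B uses that after an ascending sort the minimum of each top-down m-chunk sits at a fixed stride, so the answer is one strided sum m*sum(s[r+i*m]) with no inner loop, no box list and no min(); Pre_ excludes only m = 0, where A raises ZeroDivisionError.
import Mathlib
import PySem

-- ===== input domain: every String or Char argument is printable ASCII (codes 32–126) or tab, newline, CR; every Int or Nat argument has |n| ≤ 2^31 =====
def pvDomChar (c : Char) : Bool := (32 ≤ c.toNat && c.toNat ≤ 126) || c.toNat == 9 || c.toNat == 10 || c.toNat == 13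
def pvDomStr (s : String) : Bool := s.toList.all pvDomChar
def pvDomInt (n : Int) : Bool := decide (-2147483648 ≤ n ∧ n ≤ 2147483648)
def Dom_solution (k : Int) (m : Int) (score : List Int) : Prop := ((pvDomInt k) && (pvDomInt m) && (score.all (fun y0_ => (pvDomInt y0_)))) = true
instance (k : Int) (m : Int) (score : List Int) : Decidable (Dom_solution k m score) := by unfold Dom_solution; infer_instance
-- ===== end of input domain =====

-- B replaces A's pop-m-per-box loop with min() by one strided sum over the ascending
-- sort (objective: simpler). Return-value equivalence only: A sorts `score` in place
-- and pops all consumed elements; B does not mutate `score`.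

-- ===== PORT A =====
-- inner loop: 'for _ in range(m): box.append(score.pop())'
-- (pop? = none is Python's IndexError; unreachable on inputs admitted by Pre_)
def solAInner : Nat → List Int → List Int → List Int × List Int
  | 0, box, s => (box, s)
  | j+1, box, s =>
    match PySem.List.pop? s with
    | none => (box, s)
    | some (x, s') => solAInner j (box ++ [x]) s'

-- outer loop: 'for _ in range(many//m): … sc=min(box); answer+=sc*m'
-- (min? = none is Python's ValueError on min([]); unreachable on inputs admitted by Pre_)
def solAOuter : Nat → Int → Int → List Int → Int × List Int
  | 0, _, answer, s => (answer, s)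
  | j+1, m, answer, s =>
    let bs := solAInner m.toNat [] s
    let sc := (PySem.List.min? bs.1 (fun x => x)).getD 0
    solAOuter j m (answer + sc * m) bs.2

def solution (k : Int) (m : Int) (score : List Int) : Int :=
  let answer : Int := 0
  let many : Int := (score.length : Int)
  let s := PySem.List.sorted score (fun x => x)
  (solAOuter (PySem.Int.floordiv many m).toNat m answer s).1

-- ===== PORT B =====
-- transliteration of Source B: sorted copy, q = n//m, r = n - m*q,
-- m * sum(s[r+i*m] for i in range(q)); the index r+i*m is always in range
-- on inputs admitted by Pre_, so s[...] is pyGetD with an unreachable default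
def solution_alt (k : Int) (m : Int) (score : List Int) : Int :=
  let s := PySem.List.sorted score (fun x => x)
  let n : Int := (s.length : Int)
  let q := PySem.Int.floordiv n m
  let r := n - m * q
  m * ((PySem.List.pyRange 0 q).foldl (fun acc i => acc + PySem.List.pyGetD s (r + i * m) 0) 0)

-- ===== PRECONDITION & SPEC =====
-- Pre_ excludes exactly m = 0, where A raises ZeroDivisionError at 'many//m'
def Pre_solution (k : Int) (m : Int) (score : List Int) : Prop := m ≠ 0
instance (k : Int) (m : Int) (score : List Int) : Decidable (Pre_solution k m score) := by unfold Pre_solution; infer_instance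
def pvWitness_solution : Int × Int × List Int := (4, 3, [4, 1, 2, 5, 2, 4, 1])

def Spec_solution (k : Int) (m : Int) (score : List Int) (out : Int) : Prop := out = solution_alt k m score
instance (k : Int) (m : Int) (score : List Int) (out : Int) : Decidable (Spec_solution k m score out) := by unfold Spec_solution; infer_instance

-- ===== CLAIM (what is proved, stated in full; the proofs are below) =====
def Claim_equal_solution : Prop := ∀ (k : Int) (m : Int) (score : List Int), Dom_solution k m score → Pre_solution k m score → Spec_solution k m score (solution k m score)

-- ===== LEMMAS AND PROOFS =====

-- reversed-index sum over range
theorem pvSumReflect (f : ℕ → ℤ) (n : ℕ) :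
    ((List.range n).map (fun j => f (n-1-j))).sum = ((List.range n).map f).sum := by
  induction n with
  | zero => rfl
  | succ n ih =>
    conv_lhs => rw [List.range_succ_eq_map]
    conv_rhs => rw [List.range_succ]
    simp only [List.map_cons, List.map_map, List.sum_cons, List.map_append, List.sum_append,
      Function.comp_def]
    rw [← ih]
    have h1 : (n + 1 - 1 - 0) = n := by omega
    have h2 : (List.map (fun x => f (n + 1 - 1 - (x + 1))) (List.range n)) =
        (List.map (fun j => f (n - 1 - j)) (List.range n)) := by
      apply List.map_congr_left; intro j hj; congr 1; omega
    simp only [h1, h2]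
    simp; ring

-- the inner pop loop pops the last mI elements
theorem pvInner (mI : ℕ) : ∀ (s box : List Int), mI ≤ s.length →
    solAInner mI box s = (box ++ (s.drop (s.length - mI)).reverse, s.take (s.length - mI)) := by
  induction mI with
  | zero => intro s box _; simp [solAInner]
  | succ mI ih =>
    intro s box hle
    have hne : s ≠ [] := by intro h; subst h; simp at hle
    have hsplit : s.dropLast ++ [s.getLast hne] = s := List.dropLast_concat_getLast hne
    have hlen : s.dropLast.length = s.length - 1 := by simp
    have hpop : PySem.List.pop? s = some (s.getLast hne, s.dropLast) := by
      conv_lhs => rw [← hsplit]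
      exact PySem.List.pop?_last _ _
    rw [solAInner, hpop]
    have hle' : mI ≤ s.dropLast.length := by omega
    dsimp only
    rw [ih s.dropLast (box ++ [s.getLast hne]) hle']
    have hdrop : s.drop (s.length - (mI+1)) =
        s.dropLast.drop (s.dropLast.length - mI) ++ [s.getLast hne] := by
      conv_lhs => rw [← hsplit]
      rw [List.drop_append_of_le_length (by
        simp only [List.length_append, List.length_dropLast, List.length_cons, List.length_nil]; omega)]
      congr 2
      simp only [List.length_append, List.length_dropLast, List.length_cons, List.length_nil]
      omega
    have htake : s.take (s.length - (mI+1)) = s.dropLast.take (s.dropLast.length - mI) := by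
      conv_lhs => rw [← hsplit]
      rw [List.take_append_of_le_length (by
        simp only [List.length_append, List.length_dropLast, List.length_cons, List.length_nil]; omega)]
      congr 1
      simp only [List.length_append, List.length_dropLast, List.length_cons, List.length_nil]
      omega
    rw [hdrop, htake]
    simp

-- min of the reversed top chunk of a sorted list is the chunk's first element
theorem pvMinChunk (s : List Int) (hs : List.Pairwise (· ≤ ·) s) (mI : ℕ)
    (h1 : 1 ≤ mI) (h2 : mI ≤ s.length) :
    ((PySem.List.min? ((s.drop (s.length - mI)).reverse) (fun x => x)).getD 0)
      = s.getD (s.length - mI) 0 := by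
  set l := s.drop (s.length - mI) with hl
  have hlen : l.length = mI := by simp [hl]; omega
  have hlpos : 0 < l.length := by omega
  have hne : l ≠ [] := by intro h; rw [h] at hlen; simp at hlen; omega
  have hner : l.reverse ≠ [] := by simpa using hne
  obtain ⟨v, hv⟩ : ∃ v, PySem.List.min? l.reverse (fun x => x) = some v := by
    cases hmin : PySem.List.min? l.reverse (fun x => x) with
    | none => exact absurd ((PySem.List.min?_eq_none_iff _ _).mp hmin) hner
    | some v => exact ⟨v, rfl⟩
  have hvmem : v ∈ l := by simpa using PySem.List.min?_mem hv
  have hvmin : ∀ y ∈ l, v ≤ y := by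
    intro y hy
    exact PySem.List.min?_isMin hv y (by simpa using hy)
  have hpair : List.Pairwise (· ≤ ·) l := List.Pairwise.drop hs
  have hheadmem : l[0]'hlpos ∈ l := List.getElem_mem _
  have hheadle : ∀ y ∈ l, l[0]'hlpos ≤ y := by
    intro y hy
    obtain ⟨i, hi, rfl⟩ := List.getElem_of_mem hy
    rcases Nat.eq_zero_or_pos i with h0 | h0
    · subst h0; rfl
    · exact List.pairwise_iff_getElem.mp hpair 0 i (by omega) hi h0
  have hl0 : l[0]'hlpos = s.getD (s.length - mI) 0 := by
    rw [List.getD_eq_getElem s _ (show s.length - mI < s.length by omega)]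
    simp [hl]
  have h1' : v ≤ l[0]'hlpos := hvmin _ hheadmem
  have h2' : l[0]'hlpos ≤ v := hheadle v hvmem
  rw [hv]
  simp only [Option.getD_some]
  omega

-- the outer loop equals a strided sum (descending index order)
theorem pvOuter (mN : ℕ) (hm : 1 ≤ mN) : ∀ (qN : ℕ) (s : List Int) (a : Int),
    List.Pairwise (· ≤ ·) s → qN * mN ≤ s.length →
    (solAOuter qN (mN : Int) a s).1 =
      a + ((List.range qN).map (fun j => s.getD (s.length - (j+1)*mN) 0 * (mN : Int))).sum := by
  intro qN
  induction qN with
  | zero => intro s a _ _; simp [solAOuter]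
  | succ qN ih =>
    intro s a hs hle
    have hmle : mN ≤ s.length := by nlinarith
    rw [solAOuter]
    have htn : ((mN : Int)).toNat = mN := by omega
    rw [htn, pvInner mN s [] hmle]
    simp only [List.nil_append]
    rw [pvMinChunk s hs mN hm hmle]
    set s' := s.take (s.length - mN) with hs'
    have hlen' : s'.length = s.length - mN := by rw [hs', List.length_take]; omega
    have hs'pair : List.Pairwise (· ≤ ·) s' := List.Pairwise.take hs
    have hle' : qN * mN ≤ s'.length := by
      rw [hlen']
      have : (qN + 1) * mN = qN * mN + mN := by ring
      omega
    rw [ih s' _ hs'pair hle']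
    -- rewrite s'.getD as s.getD
    have hidx : (List.range qN).map (fun j => s'.getD (s'.length - (j+1)*mN) 0 * (mN : Int)) =
        (List.range qN).map (fun j => s.getD (s.length - (j+2)*mN) 0 * (mN : Int)) := by
      apply List.map_congr_left
      intro j hj
      have hj' : j < qN := List.mem_range.mp hj
      have hidxlt : s'.length - (j+1)*mN < s.length - mN := by
        rw [hlen']
        have h1 : (j+1) * mN ≥ mN := by nlinarith
        have h2 : (qN+1) * mN ≤ s.length := hle
        have h3 : (j+2) * mN ≤ (qN+1) * mN := by nlinarith
        have h4 : (j+2) * mN = (j+1)*mN + mN := by ring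
        omega
      congr 1
      have heq : s'.length - (j+1)*mN = s.length - (j+2)*mN := by
        rw [hlen']
        have h4 : (j+2) * mN = mN + (j+1)*mN := by ring
        omega
      rw [heq]
      unfold List.getD
      congr 1
      rw [hs']
      exact List.getElem?_take_of_lt (by omega)
    rw [hidx]
    -- fold the two pieces into one range (qN+1) sum
    conv_rhs => rw [List.range_succ_eq_map]
    simp only [List.map_cons, List.map_map, List.sum_cons, Function.comp_def]
    have : (List.map (fun x => s.getD (s.length - (x + 1 + 1) * mN) 0 * (mN:Int)) (List.range qN)) =
        (List.map (fun j => s.getD (s.length - (j + 2) * mN) 0 * (mN:Int)) (List.range qN)) := by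
      apply List.map_congr_left; intro j _; norm_num
    rw [this]
    simp only [Nat.zero_add, Nat.one_mul]
    ring

-- ===== VERDICT (by name: the statement is the Claim_ definition above) =====
theorem solution_spec : Claim_equal_solution := by
  intro k m score _ hpre
  unfold Spec_solution
  have hpre' : m ≠ 0 := hpre
  set s := PySem.List.sorted score (fun x => x) with hsdef
  have hs : List.Pairwise (· ≤ ·) s := PySem.List.sorted_pairwise score (fun x => x)
  have hslen : s.length = score.length := (PySem.List.sorted_perm score (fun x => x) false).length_eq
  have hA : solution k m score =
      (solAOuter (PySem.Int.floordiv ((score.length : Int)) m).toNat m 0 s).1 := rfl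
  have hB : solution_alt k m score =
      m * ((PySem.List.pyRange 0 (PySem.Int.floordiv ((s.length : Int)) m)).foldl
        (fun acc i => acc + PySem.List.pyGetD s
          (((s.length : Int)) - m * PySem.Int.floordiv ((s.length : Int)) m + i * m) 0) 0) := rfl
  rw [hA, hB, ← hslen]
  rcases lt_or_gt_of_ne hpre' with hneg | hpos
  · -- m < 0 : both sides are 0
    have hq : PySem.Int.floordiv ((s.length : Int)) m ≤ 0 := by
      have hmam := PySem.Int.floordiv_mul_add_mod ((s.length : Int)) m
      have hmnb := PySem.Int.mod_neg_bounds (a := ((s.length : Int))) hneg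
      nlinarith [Int.natCast_nonneg s.length]
    have ht : (PySem.Int.floordiv ((s.length : Int)) m).toNat = 0 := by omega
    have hr : PySem.List.pyRange 0 (PySem.Int.floordiv ((s.length : Int)) m) = [] := by
      simp [PySem.List.pyRange]; omega
    rw [ht, hr]
    simp [solAOuter]
  · -- m > 0
    obtain ⟨mN, rfl⟩ : ∃ mN : ℕ, m = (mN : Int) := ⟨m.toNat, by omega⟩
    have hmN : 1 ≤ mN := by omega
    set n := s.length with hn
    have hfd : PySem.Int.floordiv ((n : Int)) ((mN : Int)) = ((n / mN : ℕ) : Int) :=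
      PySem.Int.floordiv_natCast n mN
    set qN := n / mN with hqN
    have hdm : mN * qN + n % mN = n := Nat.div_add_mod n mN
    have hmod : n % mN < mN := Nat.mod_lt _ (by omega)
    have hqle : qN * mN ≤ n := Nat.div_mul_le_self n mN
    rw [hfd, Int.toNat_natCast]
    -- A side
    rw [pvOuter mN hmN qN s 0 hs hqle]
    -- B side: range, fold to sum
    rw [PySem.List.pyRange_zero_natCast qN]
    rw [PySem.List.foldl_add]
    rw [List.map_map]
    have hr : ((n : Int)) - ((mN : Int)) * ((qN : ℕ) : Int) = ((n % mN : ℕ) : Int) := by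
      push_cast; omega
    have hBmap : (List.range qN).map
        ((fun i => PySem.List.pyGetD s (((n : Int)) - ((mN : Int)) * ((qN : ℕ) : Int) + i * ((mN : Int))) 0) ∘ (fun k => ((k : ℕ) : Int))) =
        (List.range qN).map (fun j => s.getD (n % mN + j * mN) 0) := by
      apply List.map_congr_left
      intro j _
      simp only [Function.comp_apply]
      rw [hr]
      have hcast : ((n % mN : ℕ) : Int) + ((j : ℕ) : Int) * ((mN : ℕ) : Int) = ((n % mN + j * mN : ℕ) : Int) := by
        push_cast; ring
      rw [hcast, PySem.List.pyGetD_of_nonneg s 0 (by positivity), Int.toNat_natCast]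
    rw [hBmap]
    -- reindex A's descending sum into B's ascending one
    have hAmap : (List.range qN).map (fun j => s.getD (n - (j+1)*mN) 0 * ((mN : ℕ) : Int)) =
        (List.range qN).map (fun j => (fun i => s.getD (n % mN + i * mN) 0 * ((mN : ℕ) : Int)) (qN - 1 - j)) := by
      apply List.map_congr_left
      intro j hj
      have hjlt : j < qN := List.mem_range.mp hj
      simp only []
      congr 2
      have hmul : (qN - 1 - j) * mN + (j + 1) * mN = qN * mN := by
        rw [← Nat.add_mul]; congr 1; omega
      have h2 : (j + 1) * mN ≤ qN * mN := Nat.mul_le_mul_right _ (by omega)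
      have h3 : qN * mN = mN * qN := Nat.mul_comm _ _
      omega
    rw [hAmap, pvSumReflect (fun i => s.getD (n % mN + i * mN) 0 * ((mN : ℕ) : Int)) qN]
    rw [List.sum_map_mul_right]
    ring
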